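-- pv_equiv track=rewrite | github.com/Neuroservice/CryptoAnalystAI_bot | bot/utils/validations.py | is_valid_number_with_suffix
-- ===== SOURCE A (Python) =====
-- def is_valid_number_with_suffix(value: str) -> bool:
--     """
--     Проверяет, что строка:
--     1) Может содержать цифры, точки, запятые.
--     2) Опционально заканчивается на K, M или B (в любом регистре).
--     3) Не содержит других букв/символов.
--
--     Примеры валидных:
--       "123" -> True
--       "42.5" -> True
--       "10,500" -> True
--       "1.2M"  -> True
--       "950k"  -> True
--       "3,2B"  -> True (хотя 3,2 не совсем стандарт, но по условию допустим)
--     Примеры невалидных: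
--       "abc", "12X", "??" -> False
--     """
--     s = value.strip()
--     if not s:
--         return False
--
--     s_upper = s.upper()
--
--     suffix = ""
--     if s_upper[-1] in ("K", "M", "B"):
--         suffix = s_upper[-1]
--         s_upper = s_upper[:-1]
--         if not s_upper:
--             return False
--
--     for ch in s_upper:
--         if ch not in "0123456789.,":
--             return False
--
--     digits_found = any(ch.isdigit() for ch in s_upper)
--     if not digits_found:
--         return False
--
--     return True
-- ===== SOURCE B (Python) =====
-- def is_valid_number_with_suffix(value: str) -> bool:
--     # single left-to-right pass: a small state machine tracking whether a digit
--     # was seen; a K/M/B letter ends the scan and must be the final character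
--     it = iter(value.strip())
--     seen_digit = False
--     for ch in it:
--         if ch in "0123456789":
--             seen_digit = True
--         elif ch in ".,":
--             continue
--         elif ch in "KkMmBb":
--             return seen_digit and next(it, None) is None
--         else:
--             return False
--     return seen_digit
-- ===== Notes on version B (the rewrite author's own statement) =====
-- stated objective: alternative
-- what changed: A works in stages over the whole string (uppercase it, test and peel the trailing suffix by index, scan all characters for the allowed alphabet, then re-scan for a digit); B is a single left-to-right state machine with early exit that never changes case: it tracks one seen_digit flag, skips dots/commas, and on the first K/M/B letter decides immediately by checking a digit was seen and no character follows.
import Mathlib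
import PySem

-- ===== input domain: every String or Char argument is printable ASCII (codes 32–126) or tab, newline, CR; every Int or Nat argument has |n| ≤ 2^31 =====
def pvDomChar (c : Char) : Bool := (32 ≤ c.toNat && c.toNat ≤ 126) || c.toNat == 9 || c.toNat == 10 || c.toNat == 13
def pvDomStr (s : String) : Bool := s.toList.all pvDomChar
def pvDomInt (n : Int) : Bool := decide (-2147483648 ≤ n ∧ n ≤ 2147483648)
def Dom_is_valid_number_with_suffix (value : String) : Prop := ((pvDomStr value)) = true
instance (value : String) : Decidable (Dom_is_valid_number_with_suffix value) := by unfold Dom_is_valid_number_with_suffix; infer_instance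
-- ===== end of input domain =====

-- B replaces A's staged passes (uppercase, peel suffix, full charset scan, digit re-scan)
-- by one left-to-right state machine with early exit (alternative decomposition, same cost).

-- ===== PORT A =====
-- the character scan + digit test of A's final part ('for ch in s_upper: … return False' then 'any(ch.isdigit() …)')
def pvA_scan (u : List Char) : Bool :=
  if u.all (fun ch => decide (ch ∈ "0123456789.,".toList)) then
    u.any PySem.Chars.isdigit
  else false

def is_valid_number_with_suffix (value : String) : Bool :=
  if PySem.Chars.strip value.toList = [] then false
  else
    if PySem.List.pyGet? (PySem.Chars.upper (PySem.Chars.strip value.toList)) (-1) = some 'K'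
        ∨ PySem.List.pyGet? (PySem.Chars.upper (PySem.Chars.strip value.toList)) (-1) = some 'M'
        ∨ PySem.List.pyGet? (PySem.Chars.upper (PySem.Chars.strip value.toList)) (-1) = some 'B' then
      if PySem.List.slice (PySem.Chars.upper (PySem.Chars.strip value.toList)) none (some (-1)) = [] then false
      else pvA_scan (PySem.List.slice (PySem.Chars.upper (PySem.Chars.strip value.toList)) none (some (-1)))
    else pvA_scan (PySem.Chars.upper (PySem.Chars.strip value.toList))

-- ===== PORT B =====
-- Source B's loop over the iterator with the seen_digit accumulator; a K/M/B letter
-- returns 'seen_digit and next(it, None) is None' (= the rest of the chars is empty)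
def pvB_step : List Char → Bool → Bool
  | [], seen => seen
  | ch :: rest, seen =>
    if ch ∈ "0123456789".toList then pvB_step rest true
    else if ch ∈ ".,".toList then pvB_step rest seen
    else if ch ∈ "KkMmBb".toList then seen && rest.isEmpty
    else false

def is_valid_number_with_suffix_alt (value : String) : Bool :=
  pvB_step (PySem.Chars.strip value.toList) false

-- ===== PRECONDITION & SPEC =====
def Spec_is_valid_number_with_suffix (value : String) (out : Bool) : Prop := out = is_valid_number_with_suffix_alt value
instance (value : String) (out : Bool) : Decidable (Spec_is_valid_number_with_suffix value out) := by unfold Spec_is_valid_number_with_suffix; infer_instance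

-- ===== CLAIM (what is proved, stated in full; the proofs are below) =====
def Claim_equal_is_valid_number_with_suffix : Prop := ∀ (value : String), Dom_is_valid_number_with_suffix value → Spec_is_valid_number_with_suffix value (is_valid_number_with_suffix value)

-- ===== LEMMAS AND PROOFS =====

theorem char_eq_iff (a b : Char) : a = b ↔ a.toNat = b.toNat := by
  rw [Char.ext_iff]; exact UInt32.toNat_inj.symm

theorem char_le_iff (a b : Char) : a ≤ b ↔ a.toNat ≤ b.toNat := by
  rw [Char.le_def]; exact UInt32.le_iff_toNat_le

theorem islower_iff (c : Char) : PySem.Chars.islower c = true ↔ (97 ≤ c.toNat ∧ c.toNat ≤ 122) := by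
  unfold PySem.Chars.islower
  rw [Bool.and_eq_true, decide_eq_true_eq, decide_eq_true_eq, char_le_iff, char_le_iff]
  have h1 : ('a').toNat = 97 := rfl
  have h2 : ('z').toNat = 122 := rfl
  rw [h1, h2]

theorem upperChar_toNat (c : Char) :
    (PySem.Chars.upperChar c).toNat =
      if 97 ≤ c.toNat ∧ c.toNat ≤ 122 then c.toNat - 32 else c.toNat := by
  unfold PySem.Chars.upperChar
  by_cases h : 97 ≤ c.toNat ∧ c.toNat ≤ 122
  · rw [if_pos ((islower_iff c).mpr h), if_pos h, Char.toNat_ofNat, if_pos (Or.inl (by omega))]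
  · rw [if_neg (fun hc => h ((islower_iff c).mp hc)), if_neg h]

theorem suffix_iff (c : Char) :
    (PySem.Chars.upperChar c = 'K' ∨ PySem.Chars.upperChar c = 'M' ∨ PySem.Chars.upperChar c = 'B')
      ↔ c ∈ "KkMmBb".toList := by
  have h := upperChar_toNat c
  have e : "KkMmBb".toList = ['K','k','M','m','B','b'] := rfl
  rw [e]
  simp only [List.mem_cons, List.not_mem_nil, or_false, char_eq_iff]
  have h1 : ('K').toNat = 75 := rfl
  have h2 : ('M').toNat = 77 := rfl
  have h3 : ('B').toNat = 66 := rfl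
  have h4 : ('k').toNat = 107 := rfl
  have h5 : ('m').toNat = 109 := rfl
  have h6 : ('b').toNat = 98 := rfl
  rw [h1, h2, h3, h4, h5, h6]
  by_cases hc : 97 ≤ c.toNat ∧ c.toNat ≤ 122
  · rw [if_pos hc] at h; omega
  · rw [if_neg hc] at h; omega

theorem allowed_iff (c : Char) :
    PySem.Chars.upperChar c ∈ "0123456789.,".toList ↔ c ∈ "0123456789.,".toList := by
  have h := upperChar_toNat c
  have e : "0123456789.,".toList = ['0','1','2','3','4','5','6','7','8','9','.',','] := rfl
  rw [e]
  simp only [List.mem_cons, List.not_mem_nil, or_false, char_eq_iff]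
  have h0 : ('0').toNat = 48 := rfl
  have h1 : ('1').toNat = 49 := rfl
  have h2 : ('2').toNat = 50 := rfl
  have h3 : ('3').toNat = 51 := rfl
  have h4 : ('4').toNat = 52 := rfl
  have h5 : ('5').toNat = 53 := rfl
  have h6 : ('6').toNat = 54 := rfl
  have h7 : ('7').toNat = 55 := rfl
  have h8 : ('8').toNat = 56 := rfl
  have h9 : ('9').toNat = 57 := rfl
  have hd : ('.').toNat = 46 := rfl
  have hcm : (',').toNat = 44 := rfl
  rw [h0, h1, h2, h3, h4, h5, h6, h7, h8, h9, hd, hcm]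
  by_cases hc : 97 ≤ c.toNat ∧ c.toNat ≤ 122
  · rw [if_pos hc] at h; omega
  · rw [if_neg hc] at h; omega

theorem isdigit_upperChar (c : Char) :
    PySem.Chars.isdigit (PySem.Chars.upperChar c) = PySem.Chars.isdigit c := by
  have h := upperChar_toNat c
  unfold PySem.Chars.isdigit
  rw [Bool.eq_iff_iff]
  simp only [Bool.and_eq_true, decide_eq_true_eq, char_le_iff]
  have h0 : ('0').toNat = 48 := rfl
  have h9 : ('9').toNat = 57 := rfl
  rw [h0, h9]
  by_cases hc : 97 ≤ c.toNat ∧ c.toNat ≤ 122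
  · rw [if_pos hc] at h; omega
  · rw [if_neg hc] at h; omega

theorem digc_iff (c : Char) :
    PySem.Chars.isdigit c = decide (c ∈ "0123456789".toList) := by
  unfold PySem.Chars.isdigit
  rw [Bool.eq_iff_iff]
  have e : "0123456789".toList = ['0','1','2','3','4','5','6','7','8','9'] := rfl
  rw [e]
  simp only [Bool.and_eq_true, decide_eq_true_eq, char_le_iff, List.mem_cons,
    List.not_mem_nil, or_false, char_eq_iff]
  have h0 : ('0').toNat = 48 := rfl
  have h1 : ('1').toNat = 49 := rfl
  have h2 : ('2').toNat = 50 := rfl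
  have h3 : ('3').toNat = 51 := rfl
  have h4 : ('4').toNat = 52 := rfl
  have h5 : ('5').toNat = 53 := rfl
  have h6 : ('6').toNat = 54 := rfl
  have h7 : ('7').toNat = 55 := rfl
  have h8 : ('8').toNat = 56 := rfl
  have h9 : ('9').toNat = 57 := rfl
  rw [h0, h1, h2, h3, h4, h5, h6, h7, h8, h9]
  omega

theorem digit_mem_body (c : Char) (h : c ∈ "0123456789".toList) :
    c ∈ "0123456789.,".toList := by
  have e : "0123456789".toList = ['0','1','2','3','4','5','6','7','8','9'] := rfl
  rw [e] at h
  simp only [List.mem_cons, List.not_mem_nil, or_false] at h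
  rcases h with rfl|rfl|rfl|rfl|rfl|rfl|rfl|rfl|rfl|rfl <;> decide

theorem sep_mem_body (c : Char) (h : c ∈ ".,".toList) :
    c ∈ "0123456789.,".toList ∧ c ∉ "0123456789".toList := by
  have e : ".,".toList = ['.',','] := rfl
  rw [e] at h
  simp only [List.mem_cons, List.not_mem_nil, or_false] at h
  rcases h with rfl|rfl <;> exact ⟨by decide, by decide⟩

theorem suf_not_body (c : Char) (h : c ∈ "KkMmBb".toList) :
    c ∉ "0123456789.,".toList := by
  have e : "KkMmBb".toList = ['K','k','M','m','B','b'] := rfl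
  rw [e] at h
  simp only [List.mem_cons, List.not_mem_nil, or_false] at h
  rcases h with rfl|rfl|rfl|rfl|rfl|rfl <;> decide

theorem body_split (c : Char) (h : c ∈ "0123456789.,".toList) :
    c ∈ "0123456789".toList ∨ c ∈ ".,".toList := by
  have e : "0123456789.,".toList = ['0','1','2','3','4','5','6','7','8','9','.',','] := rfl
  rw [e] at h
  simp only [List.mem_cons, List.not_mem_nil, or_false] at h
  rcases h with rfl|rfl|rfl|rfl|rfl|rfl|rfl|rfl|rfl|rfl|rfl|rfl
  all_goals first
    | exact Or.inl (by decide)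
    | exact Or.inr (by decide)

-- one step of B's state machine, with the branch conditions kept opaque
theorem pvB_step_cons (c : Char) (rest : List Char) (seen : Bool) :
    pvB_step (c :: rest) seen =
      if c ∈ "0123456789".toList then pvB_step rest true
      else if c ∈ ".,".toList then pvB_step rest seen
      else if c ∈ "KkMmBb".toList then seen && rest.isEmpty
      else false := rfl

-- the loop-value of B on a body followed by a suffix letter
theorem pvB_suf (m : List Char) (a : Char) (ha : a ∈ "KkMmBb".toList) :
    ∀ seen, pvB_step (m ++ [a]) seen =
      (m.all (fun ch => decide (ch ∈ "0123456789.,".toList)) &&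
        (seen || m.any (fun ch => decide (ch ∈ "0123456789".toList)))) := by
  induction m with
  | nil =>
    intro seen
    have hnd : a ∉ "0123456789".toList := fun h => suf_not_body a ha (digit_mem_body a h)
    have hns : a ∉ ".,".toList := fun h => suf_not_body a ha (sep_mem_body a h).1
    rw [List.nil_append, pvB_step_cons, if_neg hnd, if_neg hns, if_pos ha,
      List.all_nil, List.any_nil, List.isEmpty_nil, Bool.and_true, Bool.true_and, Bool.or_false]
  | cons c m ih =>
    intro seen
    rw [List.cons_append, pvB_step_cons, List.all_cons, List.any_cons]
    by_cases hd : c ∈ "0123456789".toList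
    · rw [if_pos hd, ih true, decide_eq_true (digit_mem_body c hd), decide_eq_true hd,
        Bool.true_and, Bool.true_or, Bool.or_true, Bool.and_true]
    · rw [if_neg hd]
      by_cases hs : c ∈ ".,".toList
      · rw [if_pos hs, ih seen, decide_eq_true (sep_mem_body c hs).1,
          decide_eq_false (sep_mem_body c hs).2, Bool.true_and, Bool.false_or]
      · rw [if_neg hs]
        have hb : c ∉ "0123456789.,".toList := fun h => (body_split c h).elim hd hs
        rw [decide_eq_false hb, Bool.false_and, Bool.false_and]
        by_cases hk : c ∈ "KkMmBb".toList
        · rw [if_pos hk]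
          have : (m ++ [a]).isEmpty = false := by
            rw [List.isEmpty_eq_false_iff]
            simp
          rw [this, Bool.and_false]
        · rw [if_neg hk]

-- the loop-value of B on a list whose last char is not a suffix letter
theorem pvB_nosuf (m : List Char) (a : Char) (ha : a ∉ "KkMmBb".toList) :
    ∀ seen, pvB_step (m ++ [a]) seen =
      ((m ++ [a]).all (fun ch => decide (ch ∈ "0123456789.,".toList)) &&
        (seen || (m ++ [a]).any (fun ch => decide (ch ∈ "0123456789".toList)))) := by
  induction m with
  | nil =>
    intro seen
    rw [List.nil_append, pvB_step_cons, List.all_cons, List.any_cons,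
      List.all_nil, List.any_nil, Bool.and_true, Bool.or_false]
    by_cases hd : a ∈ "0123456789".toList
    · rw [if_pos hd, decide_eq_true (digit_mem_body a hd), decide_eq_true hd,
        Bool.true_and, Bool.or_true]
      rfl
    · rw [if_neg hd]
      by_cases hs : a ∈ ".,".toList
      · rw [if_pos hs, decide_eq_true (sep_mem_body a hs).1,
          decide_eq_false (sep_mem_body a hs).2, Bool.true_and, Bool.or_false]
        rfl
      · rw [if_neg hs, if_neg ha]
        have hb : a ∉ "0123456789.,".toList := fun h => (body_split a h).elim hd hs
        rw [decide_eq_false hb, Bool.false_and]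
  | cons c m ih =>
    intro seen
    rw [List.cons_append, pvB_step_cons, List.all_cons, List.any_cons]
    by_cases hd : c ∈ "0123456789".toList
    · rw [if_pos hd, ih true, decide_eq_true (digit_mem_body c hd), decide_eq_true hd,
        Bool.true_and, Bool.true_or, Bool.or_true, Bool.and_true]
    · rw [if_neg hd]
      by_cases hs : c ∈ ".,".toList
      · rw [if_pos hs, ih seen, decide_eq_true (sep_mem_body c hs).1,
          decide_eq_false (sep_mem_body c hs).2, Bool.true_and, Bool.false_or]
      · rw [if_neg hs]
        have hb : c ∉ "0123456789.,".toList := fun h => (body_split c h).elim hd hs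
        rw [decide_eq_false hb, Bool.false_and, Bool.false_and]
        by_cases hk : c ∈ "KkMmBb".toList
        · rw [if_pos hk]
          have : (m ++ [a]).isEmpty = false := by
            rw [List.isEmpty_eq_false_iff]
            simp
          rw [this, Bool.and_false]
        · rw [if_neg hk]

-- mapping upperChar over the body changes neither scan
theorem upper_all_eq (l : List Char) :
    (l.map PySem.Chars.upperChar).all (fun ch => decide (ch ∈ "0123456789.,".toList)) =
      l.all (fun ch => decide (ch ∈ "0123456789.,".toList)) := by
  induction l with
  | nil => rfl
  | cons c l ih =>
    rw [List.map_cons, List.all_cons, List.all_cons, ih,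
      decide_eq_decide.mpr (allowed_iff c)]

theorem upper_any_eq (l : List Char) :
    (l.map PySem.Chars.upperChar).any PySem.Chars.isdigit =
      l.any (fun ch => decide (ch ∈ "0123456789".toList)) := by
  induction l with
  | nil => rfl
  | cons c l ih =>
    rw [List.map_cons, List.any_cons, List.any_cons, ih, isdigit_upperChar, digc_iff]

-- A's two scans over the uppercased body equal B's two boolean accumulations over the raw body
theorem pvA_scan_eq (l : List Char) :
    pvA_scan (PySem.Chars.upper l) =
      (l.all (fun ch => decide (ch ∈ "0123456789.,".toList)) &&
        l.any (fun ch => decide (ch ∈ "0123456789".toList))) := by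
  unfold pvA_scan PySem.Chars.upper
  rw [upper_all_eq, upper_any_eq]
  by_cases h : l.all (fun ch => decide (ch ∈ "0123456789.,".toList)) = true
  · rw [if_pos h, h, Bool.true_and]
  · rw [Bool.not_eq_true] at h
    rw [h, if_neg (by simp), Bool.false_and]

theorem pyGet_last (l : List Char) (a : Char) : PySem.List.pyGet? (l ++ [a]) (-1) = some a := by
  simp [pysem]

theorem slice_init (l : List Char) (a : Char) :
    PySem.List.slice (l ++ [a]) none (some (-1)) = l := by
  simp [pysem]

theorem upper_append (l : List Char) (a : Char) :
    PySem.Chars.upper (l ++ [a]) = PySem.Chars.upper l ++ [PySem.Chars.upperChar a] := by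
  simp [PySem.Chars.upper]

-- ===== VERDICT (by name: the statement is the Claim_ definition above) =====
theorem is_valid_number_with_suffix_spec : Claim_equal_is_valid_number_with_suffix := by
  intro value _
  unfold Spec_is_valid_number_with_suffix is_valid_number_with_suffix is_valid_number_with_suffix_alt
  generalize PySem.Chars.strip value.toList = t
  rcases t.eq_nil_or_concat with rfl | ⟨m, a, rfl⟩
  · rfl
  · rw [List.concat_eq_append]
    have hne : m ++ [a] ≠ [] := by simp
    rw [if_neg hne, upper_append, pyGet_last, slice_init]
    by_cases hk : a ∈ "KkMmBb".toList
    · have hsuf : (some (PySem.Chars.upperChar a) = some 'K' ∨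
          some (PySem.Chars.upperChar a) = some 'M' ∨ some (PySem.Chars.upperChar a) = some 'B') := by
        simpa only [Option.some.injEq] using (suffix_iff a).mpr hk
      rw [if_pos hsuf, pvB_suf m a hk false]
      rcases eq_or_ne m [] with rfl | hm
      · rfl
      · rw [if_neg (by simpa [PySem.Chars.upper] using hm), pvA_scan_eq, Bool.false_or]
    · have hsuf : ¬ (some (PySem.Chars.upperChar a) = some 'K' ∨
          some (PySem.Chars.upperChar a) = some 'M' ∨ some (PySem.Chars.upperChar a) = some 'B') := by
        intro h
        exact hk ((suffix_iff a).mp (by simpa only [Option.some.injEq] using h))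
      rw [if_neg hsuf, pvB_nosuf m a hk false, ← upper_append, pvA_scan_eq, Bool.false_or]
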